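-- pv_equiv track=rewrite | github.com/YeferYV/bookgen | bookgen.py | change_sign
-- ===== SOURCE A (Python) =====
-- import string
--
-- def change_sign(t):
--     t=t.split()
--     l=[]
--     for k in range(len(t)):
--         for char in t[k]:
--             if char in string.punctuation:
--                 l+=[char]
--                 t[k]=t[k].replace(char," ►",1)
--     return ' '.join(t) , l
-- ===== SOURCE B (Python) =====
-- import string
--
-- _TABLE = str.maketrans({c: " ►" for c in string.punctuation})
--
-- def change_sign(t):
--     s = " ".join(t.split())
--     l = [c for c in s if c in string.punctuation]
--     return s.translate(_TABLE), l
-- ===== Notes on version B (the rewrite author's own statement) =====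
-- stated objective: simpler
-- what changed: A interleaves collection and repeated first-occurrence str.replace inside a word/char double loop; B normalises whitespace once, derives the punctuation list by a single filter pass, and builds the output with a prebuilt maketrans translation table in one translate pass.
import Mathlib
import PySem

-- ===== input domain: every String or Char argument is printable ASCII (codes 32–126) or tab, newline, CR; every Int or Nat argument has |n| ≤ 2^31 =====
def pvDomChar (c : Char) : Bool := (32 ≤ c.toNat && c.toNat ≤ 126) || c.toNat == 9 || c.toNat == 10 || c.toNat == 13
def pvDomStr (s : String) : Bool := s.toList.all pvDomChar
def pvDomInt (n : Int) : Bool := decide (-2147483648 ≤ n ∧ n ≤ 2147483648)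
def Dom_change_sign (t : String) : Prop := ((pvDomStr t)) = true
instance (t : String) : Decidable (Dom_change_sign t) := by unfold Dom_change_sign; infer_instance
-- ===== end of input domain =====

-- B replaces A's interleaved word/char double loop (collect + in-place first-occurrence replace)
-- by three independent passes: join of split, a filter for the list, a per-char translation for the string (simpler).

-- string.punctuation
def pvPunct : List Char := "!\"#$%&'()*+,-./:;<=>?@[\\]^_`{|}~".toList

-- ===== PORT A =====
-- hand port of w.replace(old, " ►", 1) for a single-char old: replaces the FIRST occurrence only (exact)
def pvReplace1 (s : List Char) (old : Char) (new : List Char) : List Char :=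
  match s with
  | [] => []
  | c :: rest => if c = old then new ++ rest else c :: pvReplace1 rest old new

-- inner loop of A: `for char in t[k]` (iterates the snapshot cs while mutating the current word cur)
def pvInnerA (cs : List Char) (cur : List Char) (l : List String) : List Char × List String :=
  match cs with
  | [] => (cur, l)
  | c :: rest =>
    if c ∈ pvPunct then
      pvInnerA rest (pvReplace1 cur c [' ', '►']) (l ++ [String.ofList [c]])
    else pvInnerA rest cur l

-- outer loop of A: `for k in range(len(t))`, updating t[k] in place
def pvOuterA (ws : List (List Char)) (l : List String) : List (List Char) × List String :=
  match ws with
  | [] => ([], l)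
  | w :: rest =>
    let p := pvInnerA w w l
    let q := pvOuterA rest p.2
    (p.1 :: q.1, q.2)

def change_sign (t : String) : String × List String :=
  let ws := (PySem.Str.split₀ t).map String.toList
  let r := pvOuterA ws []
  (String.ofList (PySem.Chars.join [' '] r.1), r.2)

-- ===== PORT B =====
-- the maketrans table: punctuation ↦ " ►", every other char ↦ itself
def pvTrans (c : Char) : List Char := if c ∈ pvPunct then [' ', '►'] else [c]

def change_sign_alt (t : String) : String × List String :=
  let s := PySem.Str.join " " (PySem.Str.split₀ t)
  (String.ofList (s.toList.flatMap pvTrans),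
   (s.toList.filter (· ∈ pvPunct)).map (fun c => String.ofList [c]))

-- ===== PRECONDITION & SPEC =====
def Spec_change_sign (t : String) (out : String × List String) : Prop := out = change_sign_alt t
instance (t : String) (out : String × List String) : Decidable (Spec_change_sign t out) := by unfold Spec_change_sign; infer_instance

-- ===== CLAIM (what is proved, stated in full; the proofs are below) =====
def Claim_equal_change_sign : Prop := ∀ (t : String), Dom_change_sign t → Spec_change_sign t (change_sign t)

-- ===== LEMMAS AND PROOFS =====

-- every char produced by pvTrans is non-punctuation (space and ► are not ASCII punctuation)
theorem pvTrans_not_punct {c c' : Char} (h : c' ∈ pvTrans c) : c' ∉ pvPunct := by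
  by_cases hc : c ∈ pvPunct
  · simp [pvTrans, hc] at h
    rcases h with h | h <;> subst h <;> decide
  · simp [pvTrans, hc] at h
    subst h; exact hc

theorem flatMap_trans_not_mem {c : Char} (hc : c ∈ pvPunct) (p : List Char) :
    c ∉ p.flatMap pvTrans := by
  intro h
  rcases List.mem_flatMap.mp h with ⟨d, _, hd⟩
  exact pvTrans_not_punct hd hc

theorem pvReplace1_append {old : Char} {a : List Char} (h : old ∉ a) (b new : List Char) :
    pvReplace1 (a ++ b) old new = a ++ pvReplace1 b old new := by
  induction a with
  | nil => simp
  | cons x xs ih =>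
      have hx : x ≠ old := by rintro rfl; exact h (List.mem_cons_self)
      have h' : old ∉ xs := fun hm => h (List.mem_cons_of_mem _ hm)
      simp [pvReplace1, hx, ih h']

theorem pvInnerA_spec (cs : List Char) (p : List Char) (l : List String) :
    pvInnerA cs (p.flatMap pvTrans ++ cs) l
      = (p.flatMap pvTrans ++ cs.flatMap pvTrans,
         l ++ (cs.filter (· ∈ pvPunct)).map (fun c => String.ofList [c])) := by
  induction cs generalizing p l with
  | nil => simp [pvInnerA]
  | cons c rest ih =>
      by_cases hc : c ∈ pvPunct
      · have hrepl : pvReplace1 (p.flatMap pvTrans ++ (c :: rest)) c [' ', '►']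
            = (p ++ [c]).flatMap pvTrans ++ rest := by
          rw [pvReplace1_append (flatMap_trans_not_mem hc p)]
          simp [pvReplace1, pvTrans, hc]
        have := ih (p ++ [c]) (l ++ [String.ofList [c]])
        simp only [pvInnerA, hc, if_pos, hrepl]
        rw [this]
        simp [pvTrans, hc]
      · have hstep : p.flatMap pvTrans ++ (c :: rest) = (p ++ [c]).flatMap pvTrans ++ rest := by
          simp [pvTrans, hc]
        have := ih (p ++ [c]) l
        simp only [pvInnerA, hc, if_neg, not_false_iff, hstep]
        rw [this]
        simp [pvTrans, hc]

theorem pvInnerA_word (w : List Char) (l : List String) :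
    pvInnerA w w l = (w.flatMap pvTrans, l ++ (w.filter (· ∈ pvPunct)).map (fun c => String.ofList [c])) := by
  have := pvInnerA_spec w [] l
  simpa using this

theorem pvOuterA_spec (ws : List (List Char)) (l : List String) :
    pvOuterA ws l = (ws.map (·.flatMap pvTrans),
      l ++ ws.flatMap (fun w => (w.filter (· ∈ pvPunct)).map (fun c => String.ofList [c]))) := by
  induction ws generalizing l with
  | nil => simp [pvOuterA]
  | cons w rest ih => simp [pvOuterA, pvInnerA_word, ih]

theorem space_not_punct : (' ' ∈ pvPunct) = False := by decide

theorem join_map_trans (ws : List (List Char)) :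
    PySem.Chars.join [' '] (ws.map (·.flatMap pvTrans))
      = (PySem.Chars.join [' '] ws).flatMap pvTrans := by
  induction ws with
  | nil => simp [PySem.Chars.join_nil]
  | cons w rest ih =>
      cases rest with
      | nil => simp [PySem.Chars.join_singleton]
      | cons v vs =>
          simp only [List.map_cons] at ih ⊢
          rw [PySem.Chars.join_cons_cons, PySem.Chars.join_cons_cons, ih]
          simp [List.flatMap_append, pvTrans, space_not_punct]

theorem filter_join (ws : List (List Char)) :
    ((PySem.Chars.join [' '] ws).filter (· ∈ pvPunct)).map (fun c => String.ofList [c])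
      = ws.flatMap (fun w => (w.filter (· ∈ pvPunct)).map (fun c => String.ofList [c])) := by
  induction ws with
  | nil => simp [PySem.Chars.join_nil]
  | cons w rest ih =>
      cases rest with
      | nil => simp [PySem.Chars.join_singleton]
      | cons v vs =>
          rw [PySem.Chars.join_cons_cons]
          simp only [List.filter_append, List.map_append, List.flatMap_cons]
          rw [ih]
          simp [space_not_punct]

-- ===== VERDICT (by name: the statement is the Claim_ definition above) =====
theorem change_sign_spec : Claim_equal_change_sign := by
  intro t _
  unfold Spec_change_sign change_sign change_sign_alt
  have hjoin : (PySem.Str.join " " (PySem.Str.split₀ t)).toList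
      = PySem.Chars.join [' '] ((PySem.Str.split₀ t).map String.toList) := by
    simp [PySem.Str.toList_join]
  simp only [pvOuterA_spec, hjoin, join_map_trans, filter_join, List.nil_append]
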